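-- pv_equiv track=rewrite | github.com/sethirus/The-Thiele-Machine | tools/generate_cnf_instances.py | generate_tree_cnf
-- ===== SOURCE A (Python) =====
-- from typing import List, Tuple, Set
--
-- def generate_tree_cnf(num_vars: int, branching: int = 2) -> Tuple[int, List[List[int]]]:
--     """
--     Generate tree-structured CNF.
--     Variables form a tree with given branching factor.
--
--     This should show H2 advantage with hierarchical partitioning.
--     """
--     clauses = []
--
--     # Build tree structure
--     for parent in range(1, num_vars):
--         for child_offset in range(1, branching + 1):
--             child = parent * branching + child_offset
--             if child <= num_vars:
--                 # Parent -> Child constraint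
--                 clauses.append([-parent, child])
--                 clauses.append([parent, -child])
--                 # Add some additional clauses
--                 if child + 1 <= num_vars:
--                     clauses.append([child, child + 1])
--
--     return num_vars, clauses
-- ===== SOURCE B (Python) =====
-- from typing import List, Tuple
--
-- def generate_tree_cnf(num_vars: int, branching: int = 2) -> Tuple[int, List[List[int]]]:
--     """Generate tree-structured CNF: one clause block per child, parent recovered by division."""
--     def block(child: int) -> List[List[int]]:
--         parent = (child - 1) // branching
--         cls = [[-parent, child], [parent, -child]]
--         if child + 1 <= num_vars:
--             cls.append([child, child + 1])
--         return cls
--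
--     if branching < 1:
--         return num_vars, []
--     clauses = [cl for child in range(branching + 1, num_vars + 1) for cl in block(child)]
--     return num_vars, clauses
-- ===== Notes on version B (the rewrite author's own statement) =====
-- stated objective: faster
-- what changed: Instead of A's nested parent/offset loops appending to an accumulator under a 'child <= num_vars' guard, B maps a per-child clause-block helper over the single flat child range range(branching+1, num_vars+1) and flattens it, recovering each parent arithmetically as (child-1)//branching.
import Mathlib
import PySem

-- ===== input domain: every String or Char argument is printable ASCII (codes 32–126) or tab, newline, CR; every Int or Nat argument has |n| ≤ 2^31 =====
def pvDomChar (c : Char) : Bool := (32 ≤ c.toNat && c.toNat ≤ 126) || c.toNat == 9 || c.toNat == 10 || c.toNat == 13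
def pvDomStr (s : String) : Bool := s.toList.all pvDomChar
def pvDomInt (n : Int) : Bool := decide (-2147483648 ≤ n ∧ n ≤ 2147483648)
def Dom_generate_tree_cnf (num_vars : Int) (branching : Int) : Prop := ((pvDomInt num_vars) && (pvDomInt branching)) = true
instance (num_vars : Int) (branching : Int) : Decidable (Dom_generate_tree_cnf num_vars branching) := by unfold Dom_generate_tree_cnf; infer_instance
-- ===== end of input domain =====

-- B replaces A's nested accumulating parent/offset loops by flattening a per-child
-- clause-block helper over one flat child range, with the parent recovered as
-- (child-1)//branching (objective: faster, measured).

-- ===== PORT A =====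
def generate_tree_cnf (num_vars : Int) (branching : Int) : Int × List (List Int) :=
  let clauses : List (List Int) :=
    (PySem.List.pyRange 1 num_vars 1).foldl (fun clauses parent =>
      (PySem.List.pyRange 1 (branching + 1) 1).foldl (fun clauses child_offset =>
        let child := parent * branching + child_offset
        if child ≤ num_vars then
          let clauses := clauses ++ [[-parent, child]] ++ [[parent, -child]]
          if child + 1 ≤ num_vars then clauses ++ [[child, child + 1]] else clauses
        else clauses) clauses) []
  (num_vars, clauses)

-- ===== PORT B =====
-- helper `block` from Source B: the clause block contributed by one child
def pvBlock (num_vars branching child : Int) : List (List Int) :=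
  let parent := PySem.Int.floordiv (child - 1) branching
  let cls := [[-parent, child], [parent, -child]]
  if child + 1 ≤ num_vars then cls ++ [[child, child + 1]] else cls

def generate_tree_cnf_alt (num_vars : Int) (branching : Int) : Int × List (List Int) :=
  if branching < 1 then (num_vars, [])
  else
    (num_vars,
      (PySem.List.pyRange (branching + 1) (num_vars + 1) 1).flatMap (pvBlock num_vars branching))

-- ===== PRECONDITION & SPEC =====
def Spec_generate_tree_cnf (num_vars : Int) (branching : Int) (out : Int × List (List Int)) : Prop := out = generate_tree_cnf_alt num_vars branching
instance (num_vars : Int) (branching : Int) (out : Int × List (List Int)) : Decidable (Spec_generate_tree_cnf num_vars branching out) := by unfold Spec_generate_tree_cnf; infer_instance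

-- ===== CLAIM (what is proved, stated in full; the proofs are below) =====
def Claim_equal_generate_tree_cnf : Prop := ∀ (num_vars : Int) (branching : Int), Dom_generate_tree_cnf num_vars branching → Spec_generate_tree_cnf num_vars branching (generate_tree_cnf num_vars branching)

-- ===== LEMMAS AND PROOFS =====

-- the clauses A emits for one child c of parent p
def pvEmit (N p c : Int) : List (List Int) :=
  [[-p, c]] ++ [[p, -c]] ++ (if c + 1 ≤ N then [[c, c + 1]] else [])

-- guarded flatMap over a range = flatMap over the range truncated at N
lemma pv_trunc (f : Int → List (List Int)) (a m N : Int) :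
    (PySem.List.pyRange a m 1).flatMap (fun c => if c ≤ N then f c else [])
      = (PySem.List.pyRange a (min m (N + 1)) 1).flatMap f := by
  rcases le_total m (N + 1) with hm | hm
  · rw [min_eq_left hm]
    apply List.flatMap_congr
    intro c hc
    rw [PySem.List.mem_pyRange_one] at hc
    rw [if_pos (by omega)]
  · rw [min_eq_right hm]
    rcases le_total a (N + 1) with ha | ha
    · rw [PySem.List.pyRange_one_append a (N + 1) m ha hm, List.flatMap_append]
      have h1 : (PySem.List.pyRange a (N + 1) 1).flatMap (fun c => if c ≤ N then f c else [])
          = (PySem.List.pyRange a (N + 1) 1).flatMap f := by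
        apply List.flatMap_congr
        intro c hc
        rw [PySem.List.mem_pyRange_one] at hc
        rw [if_pos (by omega)]
      have h2 : (PySem.List.pyRange (N + 1) m 1).flatMap (fun c => if c ≤ N then f c else [])
          = [] := by
        rw [List.flatMap_eq_nil_iff]
        intro c hc
        rw [PySem.List.mem_pyRange_one] at hc
        rw [if_neg (by omega)]
      rw [h1, h2, List.append_nil]
    · have hL : (PySem.List.pyRange a m 1).flatMap (fun c => if c ≤ N then f c else []) = [] := by
        rw [List.flatMap_eq_nil_iff]
        intro c hc
        rw [PySem.List.mem_pyRange_one] at hc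
        rw [if_neg (by omega)]
      rw [hL, PySem.List.pyRange_one_eq_nil (show (N : Int) + 1 ≤ a by omega), List.flatMap_nil]

-- consecutive children blocks (truncated at N) concatenate to one contiguous range
lemma pv_chain (b N : Int) (hb : 1 ≤ b) :
    ∀ (k : Nat) (s : Int),
      (PySem.List.pyRange s (s + k) 1).flatMap
          (fun p => PySem.List.pyRange (p * b + 1) (min (p * b + b + 1) (N + 1)) 1)
        = PySem.List.pyRange (s * b + 1) (min ((s + k) * b + 1) (N + 1)) 1 := by
  intro k
  induction k with
  | zero =>
    intro s
    simp only [Nat.cast_zero, add_zero]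
    rw [PySem.List.pyRange_one_eq_nil (le_refl s), List.flatMap_nil]
    rw [PySem.List.pyRange_one_eq_nil (by omega)]
  | succ k ih =>
    intro s
    have hcons : PySem.List.pyRange s (s + (k + 1 : Nat)) 1
        = s :: PySem.List.pyRange (s + 1) (s + (k + 1 : Nat)) 1 := by
      apply PySem.List.pyRange_one_cons
      push_cast; omega
    have hrest : (s + 1) + (k : Int) = s + ((k + 1 : Nat) : Int) := by push_cast; omega
    rw [hcons, List.flatMap_cons, ← hrest, ih (s + 1)]
    have hsb : (s + 1) * b = s * b + b := by ring
    have hkb : (0 : Int) ≤ (k : Int) * b := by positivity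
    have hkb2 : ((s + 1) + (k : Int)) * b = s * b + b + (k : Int) * b := by ring
    rcases le_total (s * b + b + 1) (N + 1) with hN | hN
    · rw [min_eq_left hN]
      rw [PySem.List.pyRange_one_append (s * b + 1) (s * b + b + 1)
            (min (((s + 1) + (k : Int)) * b + 1) (N + 1)) (by omega) (by omega)]
      rw [hsb]
    · have h1 : min (s * b + b + 1) (N + 1) = N + 1 := min_eq_right hN
      have h2 : min (((s + 1) + (k : Int)) * b + 1) (N + 1) = N + 1 := by omega
      rw [h1, h2, hsb]
      rw [PySem.List.pyRange_one_eq_nil (show (N : Int) + 1 ≤ s * b + b + 1 by omega)]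
      rw [List.append_nil]

-- on a child block of parent p, the parent is recovered by floor division
lemma pv_parent (b p c : Int) (hb : 1 ≤ b) (h1 : p * b + 1 ≤ c) (h2 : c ≤ p * b + b) :
    PySem.Int.floordiv (c - 1) b = p := by
  rw [PySem.Int.floordiv_eq_iff_of_pos (by omega)]
  have : (p + 1) * b = p * b + b := by ring
  omega

-- B's per-child block equals A's per-child emission with the recovered parent
lemma pv_block_emit (N b c : Int) :
    pvBlock N b c = pvEmit N (PySem.Int.floordiv (c - 1) b) c := by
  simp only [pvBlock, pvEmit]
  split_ifs <;> simp

-- A's inner loop, as a flatMap over the (truncated) child range with pvEmit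
lemma pv_inner (N b p : Int) (hb : 1 ≤ b) (acc : List (List Int)) :
    (PySem.List.pyRange 1 (b + 1) 1).foldl (fun clauses child_offset =>
        let child := p * b + child_offset
        if child ≤ N then
          let clauses := clauses ++ [[-p, child]] ++ [[p, -child]]
          if child + 1 ≤ N then clauses ++ [[child, child + 1]] else clauses
        else clauses) acc
      = acc ++ (PySem.List.pyRange (p * b + 1) (min (p * b + b + 1) (N + 1)) 1).flatMap
          (fun c => pvEmit N p c) := by
  have hbody : (PySem.List.pyRange 1 (b + 1) 1).foldl (fun clauses child_offset =>
        let child := p * b + child_offset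
        if child ≤ N then
          let clauses := clauses ++ [[-p, child]] ++ [[p, -child]]
          if child + 1 ≤ N then clauses ++ [[child, child + 1]] else clauses
        else clauses) acc
      = (PySem.List.pyRange 1 (b + 1) 1).foldl (fun clauses child_offset =>
          clauses ++ (if p * b + child_offset ≤ N then pvEmit N (p) (p * b + child_offset) else [])) acc := by
    apply PySem.List.foldl_congr_mem
    intro a x _
    simp only [pvEmit]
    split_ifs <;> simp [List.append_assoc]
  rw [hbody, PySem.List.foldl_append_eq_flatMap]
  congr 1
  have hr1 : PySem.List.pyRange 1 (b + 1) 1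
      = (List.range (b.toNat)).map (fun k : Nat => 1 + (k : Int)) := by
    rw [PySem.List.pyRange_one, show ((b + 1 : Int) - 1).toNat = b.toNat by omega]
  have hr2 : PySem.List.pyRange (p * b + 1) (p * b + b + 1) 1
      = (List.range (b.toNat)).map (fun k : Nat => p * b + 1 + (k : Int)) := by
    rw [PySem.List.pyRange_one, show ((p * b + b + 1 : Int) - (p * b + 1)).toNat = b.toNat by omega]
  rw [← pv_trunc (fun c => pvEmit N p c) (p * b + 1) (p * b + b + 1) N]
  rw [hr1, hr2, List.flatMap_map, List.flatMap_map]
  apply List.flatMap_congr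
  intro k _
  have : p * b + (1 + (k : Int)) = p * b + 1 + (k : Int) := by ring
  rw [this]

-- ===== VERDICT (by name: the statement is the Claim_ definition above) =====
theorem generate_tree_cnf_spec : Claim_equal_generate_tree_cnf := by
  intro N b _
  unfold Spec_generate_tree_cnf generate_tree_cnf generate_tree_cnf_alt
  simp only []
  rcases lt_or_ge b 1 with hb | hb
  · -- branching < 1: A's inner range is empty, B returns []
    rw [if_pos hb]
    have hinner : PySem.List.pyRange 1 (b + 1) 1 = [] :=
      PySem.List.pyRange_one_eq_nil (by omega)
    have hid : ∀ (l : List Int) (acc : List (List Int)),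
        l.foldl (fun clauses (_ : Int) => clauses) acc = acc := by
      intro l
      induction l with
      | nil => intro acc; rfl
      | cons x xs ih => intro acc; exact ih acc
    simp only [hinner, List.foldl_nil]
    exact congrArg _ (hid _ [])
  · -- branching ≥ 1
    rw [if_neg (by omega)]
    congr 1
    -- A side: outer fold → flatMap of truncated child blocks
    have hA : (PySem.List.pyRange 1 N 1).foldl (fun clauses parent =>
          (PySem.List.pyRange 1 (b + 1) 1).foldl (fun clauses child_offset =>
            let child := parent * b + child_offset
            if child ≤ N then
              let clauses := clauses ++ [[-parent, child]] ++ [[parent, -child]]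
              if child + 1 ≤ N then clauses ++ [[child, child + 1]] else clauses
            else clauses) clauses) []
        = (PySem.List.pyRange 1 N 1).flatMap (fun p =>
            (PySem.List.pyRange (p * b + 1) (min (p * b + b + 1) (N + 1)) 1).flatMap
              (fun c => pvEmit N p c)) := by
      rw [PySem.List.foldl_congr_mem _ _
        (fun acc p => acc ++ (PySem.List.pyRange (p * b + 1) (min (p * b + b + 1) (N + 1)) 1).flatMap
          (fun c => pvEmit N p c)) []
        (by intro acc p _; exact pv_inner N b p hb acc)]
      rw [PySem.List.foldl_append_eq_flatMap, List.nil_append]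
    rw [hA]
    -- B side: pvBlock → pvEmit with computed parent
    have hB : (PySem.List.pyRange (b + 1) (N + 1) 1).flatMap (pvBlock N b)
        = (PySem.List.pyRange (b + 1) (N + 1) 1).flatMap
            (fun c => pvEmit N (PySem.Int.floordiv (c - 1) b) c) := by
      apply List.flatMap_congr
      intro c _
      exact pv_block_emit N b c
    rw [hB]
    -- replace pvEmit N p c by pvEmit N ((c-1)//b) c inside each block
    have hsub : (PySem.List.pyRange 1 N 1).flatMap (fun p =>
          (PySem.List.pyRange (p * b + 1) (min (p * b + b + 1) (N + 1)) 1).flatMap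
            (fun c => pvEmit N p c))
        = (PySem.List.pyRange 1 N 1).flatMap (fun p =>
          (PySem.List.pyRange (p * b + 1) (min (p * b + b + 1) (N + 1)) 1).flatMap
            (fun c => pvEmit N (PySem.Int.floordiv (c - 1) b) c)) := by
      apply List.flatMap_congr
      intro p _
      apply List.flatMap_congr
      intro c hc
      rw [PySem.List.mem_pyRange_one] at hc
      rw [pv_parent b p c hb (by omega) (by omega)]
    rw [hsub, ← List.flatMap_assoc]
    congr 1
    -- pure range identity
    rcases le_or_gt N 0 with hN | hN
    · rw [PySem.List.pyRange_one_eq_nil (by omega : (N : Int) ≤ 1), List.flatMap_nil,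
          PySem.List.pyRange_one_eq_nil (by omega)]
    · have hk : (1 : Int) + ((N - 1).toNat : Int) = N := by omega
      have := pv_chain b N hb (N - 1).toNat 1
      rw [hk] at this
      rw [this]
      have hNb : min (N * b + 1) (N + 1) = N + 1 := by
        have : N ≤ N * b := le_mul_of_one_le_right (by omega) hb
        omega
      rw [one_mul, hNb]
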